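-- pv_equiv track=rewrite | github.com/tatianaportsova/cs-sprint-challenge-hash-tables | hashtables/ex5/ex5.py | finder
-- ===== SOURCE A (Python) =====
-- def finder(files, queries):
--     cache = {}
--
--     for j in files:
--         if j not in cache:
--             for i in queries:
--                 if i == j[-len(i):]:
--                     cache[j] = 1
--
--     result = list(cache.keys())
--
--     return result
-- ===== SOURCE B (Python) =====
-- def finder(files, queries):
--     # Group queries into sets keyed by length; each file then needs one
--     # suffix-slice + O(1) set lookup per DISTINCT query length.
--     by_len = {}
--     for q in queries:
--         by_len.setdefault(len(q), set()).add(q)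
--     result = []
--     added = set()
--     for f in files:
--         if f in added:
--             continue
--         if any(f[-L:] in qs for L, qs in by_len.items()):
--             result.append(f)
--             added.add(f)
--     return result
-- ===== Notes on version B (the rewrite author's own statement) =====
-- stated objective: faster
-- what changed: Instead of comparing every file against every query, B groups the queries into hash sets keyed by length once, so each file does one suffix slice plus one O(1) set lookup per distinct query length; seen files are skipped via a set instead of dict membership.
import Mathlib
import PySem

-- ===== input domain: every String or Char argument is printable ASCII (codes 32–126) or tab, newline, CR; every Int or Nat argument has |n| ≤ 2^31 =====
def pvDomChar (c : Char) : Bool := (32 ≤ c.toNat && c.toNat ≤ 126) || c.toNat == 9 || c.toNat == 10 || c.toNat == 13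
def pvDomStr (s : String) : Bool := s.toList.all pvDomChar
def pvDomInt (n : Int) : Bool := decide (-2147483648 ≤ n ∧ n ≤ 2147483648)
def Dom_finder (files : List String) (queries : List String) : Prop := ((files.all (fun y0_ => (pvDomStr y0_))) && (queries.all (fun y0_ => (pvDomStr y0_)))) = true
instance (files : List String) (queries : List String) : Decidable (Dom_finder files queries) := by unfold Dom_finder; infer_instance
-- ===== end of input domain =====

-- B groups the queries into sets keyed by length once, so each file does one suffix slice
-- plus one set lookup per distinct query length instead of a scan over all queries (faster).

-- the Python expression s[-L:] (shared verbatim by both sources)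
def pySuffix (s : String) (L : Int) : String := PySem.Str.slice s (some (-L)) none

-- ===== PORT A =====
def finder (files : List String) (queries : List String) : List String :=
  let cache : PySem.Dict String Int :=
    files.foldl (fun cache j =>
      if cache.contains j = false then
        queries.foldl (fun cache i =>
          if i == pySuffix j (PySem.Str.len i) then cache.insert j 1 else cache) cache
      else cache) PySem.Dict.empty
  cache.keys

-- ===== PORT B =====
def finder_alt (files : List String) (queries : List String) : List String :=
  let byLen : PySem.Dict Int (PySem.Set String) :=
    queries.foldl (fun d q =>
      d.modify (PySem.Str.len q) PySem.Set.empty (fun s => s.add q)) PySem.Dict.empty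
  let st : List String × PySem.Set String :=
    files.foldl (fun st f =>
      if st.2.contains f then st
      else if byLen.items.any (fun p => p.2.contains (pySuffix f p.1)) then
        (st.1 ++ [f], st.2.add f)
      else st) ([], PySem.Set.empty)
  st.1

-- ===== PRECONDITION & SPEC =====
def Spec_finder (files : List String) (queries : List String) (out : List String) : Prop := out = finder_alt files queries
instance (files : List String) (queries : List String) (out : List String) : Decidable (Spec_finder files queries out) := by unfold Spec_finder; infer_instance

-- ===== CLAIM (what is proved, stated in full; the proofs are below) =====
def Claim_equal_finder : Prop := ∀ (files : List String) (queries : List String), Dom_finder files queries → Spec_finder files queries (finder files queries)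

-- ===== LEMMAS AND PROOFS =====

-- A's inner loop over queries: inserts j (value 1) exactly when some query matches
theorem finder_innerA (queries : List String) (j : String) (c : PySem.Dict String Int) :
    queries.foldl (fun cache i =>
        if i == pySuffix j (PySem.Str.len i) then cache.insert j 1 else cache) c
      = if queries.any (fun i => i == pySuffix j (PySem.Str.len i)) then c.insert j 1 else c := by
  induction queries generalizing c with
  | nil => simp
  | cons q qs ih =>
    simp only [List.foldl_cons, List.any_cons]
    by_cases hq : (q == pySuffix j (PySem.Str.len q)) = true
    · rw [if_pos hq, ih (c.insert j 1)]
      simp only [hq, Bool.true_or, if_true]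
      by_cases hr : (qs.any fun i => i == pySuffix j (PySem.Str.len i)) = true
      · rw [if_pos hr, PySem.Dict.insert_insert_self]
      · rw [if_neg hr]
    · rw [if_neg hq, ih c]
      have hq' : (q == pySuffix j (PySem.Str.len q)) = false := by simpa using hq
      simp only [hq', Bool.false_or]

-- the group of length L built by B's first loop: the queries of length L (as a set)
theorem finder_byLen_getD (queries : List String) (d : PySem.Dict Int (PySem.Set String)) (L : Int) :
    (queries.foldl (fun d q =>
        d.modify (PySem.Str.len q) PySem.Set.empty (fun s => s.add q)) d).getD L PySem.Set.empty
      = (queries.filter (fun q => PySem.Str.len q == L)).foldl PySem.Set.add (d.getD L PySem.Set.empty) := by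
  induction queries generalizing d with
  | nil => simp
  | cons q qs ih =>
    simp only [List.foldl_cons, List.filter_cons]
    by_cases h : PySem.Str.len q = L
    · subst h
      rw [ih, PySem.Dict.getD_modify_self]
      rw [if_pos (by simp)]
      rfl
    · rw [ih, PySem.Dict.getD_modify_of_ne d PySem.Set.empty _ (Ne.symm h)]
      rw [if_neg (by simpa using h)]

theorem finder_mem_foldl_add {s : PySem.Set String} {l : List String} {x : String} :
    x ∈ l.foldl PySem.Set.add s ↔ x ∈ s ∨ x ∈ l := by
  have := PySem.Set.mem_update s l x
  simpa [PySem.Set.update] using this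

-- B's match test over byLen.items agrees with A's scan over queries
theorem finder_match_eq (queries : List String) (f : String) :
    ((queries.foldl (fun d q =>
        d.modify (PySem.Str.len q) PySem.Set.empty (fun s => s.add q))
        PySem.Dict.empty).items.any (fun p => p.2.contains (pySuffix f p.1)))
      = queries.any (fun i => i == pySuffix f (PySem.Str.len i)) := by
  set D := queries.foldl (fun d q =>
      d.modify (PySem.Str.len q) PySem.Set.empty (fun s => s.add q)) PySem.Dict.empty with hD
  have hnd : D.keys.Nodup := by
    apply PySem.Dict.nodup_keys_foldl_modify_key
    simp
  have hkeys : D.keys = PySem.Set.ofList (queries.map PySem.Str.len) := by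
    rw [hD, PySem.Dict.keys_foldl_modify_key, PySem.Dict.keys_empty, PySem.Set.update_nil_left]
  have hgetD : ∀ L : Int, D.getD L PySem.Set.empty
      = (queries.filter (fun q => PySem.Str.len q == L)).foldl PySem.Set.add PySem.Set.empty := by
    intro L
    rw [hD, finder_byLen_getD, PySem.Dict.getD_empty]
  have hitems := PySem.Dict.items_eq_map_keys D hnd PySem.Set.empty
  rw [Bool.eq_iff_iff]
  simp only [hitems, List.any_map, List.any_eq_true, Function.comp_apply]
  constructor
  · rintro ⟨L, hLmem, hc⟩
    rw [PySem.Set.contains_iff, hgetD, finder_mem_foldl_add] at hc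
    rcases hc with hc | hc
    · exact absurd hc (by simp [PySem.Set.empty])
    · rcases List.mem_filter.mp hc with ⟨hq, hlen⟩
      have hLq : PySem.Str.len (pySuffix f L) = L := by simpa using hlen
      exact ⟨pySuffix f L, hq, by rw [hLq]; exact beq_self_eq_true _⟩
  · rintro ⟨q, hq, hmatch⟩
    have hqe : q = pySuffix f (PySem.Str.len q) := by simpa using hmatch
    refine ⟨PySem.Str.len q, ?_, ?_⟩
    · rw [hkeys, PySem.Set.mem_ofList]
      exact List.mem_map_of_mem hq
    · rw [PySem.Set.contains_iff, hgetD, finder_mem_foldl_add]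
      right
      rw [← hqe]
      exact List.mem_filter.mpr ⟨hq, by simp⟩

-- the two main loops in lockstep: cache's key list = B's result list = B's seen-set
theorem finder_outer (files : List String) (m : String → Bool)
    (c : PySem.Dict String Int) (out : List String)
    (h1 : c.keys = out) :
    (files.foldl (fun cache j =>
        if cache.contains j = false then
          (if m j then cache.insert j 1 else cache)
        else cache) c).keys
      = (files.foldl (fun (st : List String × PySem.Set String) f =>
          if st.2.contains f then st
          else if m f then (st.1 ++ [f], st.2.add f)
          else st) (out, out)).1 := by
  induction files generalizing c out with
  | nil => simpa using h1
  | cons f fs ih =>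
    simp only [List.foldl_cons]
    have hcc : c.contains f = PySem.Set.contains out f := by
      rw [PySem.Dict.contains_eq_decide_mem_keys, h1]
      by_cases hm : f ∈ out
      · simp [hm]
      · have hco : PySem.Set.contains out f = false := by
          cases hco : PySem.Set.contains out f
          · rfl
          · exact absurd ((PySem.Set.contains_iff out f).mp hco) hm
        simp [hm]
    by_cases hm : f ∈ out
    · have hb : PySem.Set.contains out f = true := (PySem.Set.contains_iff out f).mpr hm
      have hc2 : c.contains f = true := by rw [hcc, hb]
      rw [if_pos hb, if_neg (show ¬(c.contains f = false) from by simp [hc2])]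
      exact ih c out h1
    · have hb : PySem.Set.contains out f = false := by
        cases hb : PySem.Set.contains out f
        · rfl
        · exact absurd ((PySem.Set.contains_iff out f).mp hb) hm
      have hc2 : c.contains f = false := by rw [hcc, hb]
      rw [if_pos hc2]
      rw [if_neg (show ¬(PySem.Set.contains out f = true) from by simp [hm])]
      by_cases hmf : m f = true
      · rw [if_pos hmf, if_pos hmf,
          show PySem.Set.add out f = out ++ [f] from by simp [PySem.Set.add, hm]]
        exact ih _ _ (by rw [PySem.Dict.keys_insert_of_not_contains _ _ hc2, h1])
      · rw [if_neg hmf, if_neg hmf]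
        exact ih c out h1

-- ===== VERDICT (by name: the statement is the Claim_ definition above) =====
theorem finder_spec : Claim_equal_finder := by
  intro files queries _
  unfold Spec_finder finder finder_alt
  simp only [finder_innerA, finder_match_eq]
  exact finder_outer files _ PySem.Dict.empty [] PySem.Dict.keys_empty
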